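-- pv_equiv track=rewrite | github.com/mikemolnar1/philly-health-expo-dashboard | collect_data.py | get_ntee_category
-- ===== SOURCE A (Python) =====
-- NTEE_CATEGORIES = {
--     'Health & Wellness': ['E', 'G', 'H'],
--     'Mental Health': ['F'],
--     'Employment/Workforce': ['J'],
--     'Youth Services': ['O'],
--     'Disability Services': ['P8'],
--     'Community Services': ['P', 'S'],
--     'Housing': ['L'],
--     'Food/Nutrition': ['K']
-- }
--
-- def get_ntee_category(ntee_code: str) -> str:
--     if not ntee_code:
--         return "Other"
--
--     ntee_code = ntee_code.upper().strip()
--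
--     for category, codes in NTEE_CATEGORIES.items():
--         for code in codes:
--             if ntee_code.startswith(code):
--                 return category
--
--     return "Other"
-- ===== SOURCE B (Python) =====
-- CODE_TO_CATEGORY = {
--     'E': 'Health & Wellness',
--     'G': 'Health & Wellness',
--     'H': 'Health & Wellness',
--     'F': 'Mental Health',
--     'J': 'Employment/Workforce',
--     'O': 'Youth Services',
--     'P8': 'Disability Services',
--     'P': 'Community Services',
--     'S': 'Community Services',
--     'L': 'Housing',
--     'K': 'Food/Nutrition',
-- }
--
-- def get_ntee_category(ntee_code: str) -> str:
--     code = ntee_code.upper().strip()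
--     # probe the longer prefix first so 'P8…' beats 'P…'
--     for prefix in (code[:2], code[:1]):
--         if prefix in CODE_TO_CATEGORY:
--             return CODE_TO_CATEGORY[prefix]
--     return "Other"
-- ===== Notes on version B (the rewrite author's own statement) =====
-- stated objective: idiomatic
-- what changed: Replaces the nested scan over the category->codes table by a flat prefix->category dict probed with the fixed-length prefixes code[:2] then code[:1] (longer first, preserving the P8-over-P priority), so the category loop disappears.
import Mathlib
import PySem

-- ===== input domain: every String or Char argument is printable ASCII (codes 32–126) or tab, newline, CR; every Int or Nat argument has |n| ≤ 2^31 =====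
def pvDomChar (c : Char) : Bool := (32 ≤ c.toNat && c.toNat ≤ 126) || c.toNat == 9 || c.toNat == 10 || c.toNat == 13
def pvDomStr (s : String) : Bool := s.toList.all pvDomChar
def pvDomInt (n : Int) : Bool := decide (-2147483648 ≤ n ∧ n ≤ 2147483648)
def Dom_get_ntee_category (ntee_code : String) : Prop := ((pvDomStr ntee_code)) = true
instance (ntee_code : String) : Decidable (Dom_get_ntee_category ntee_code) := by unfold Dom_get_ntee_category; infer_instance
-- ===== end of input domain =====

-- B replaces A's nested category/codes scan by a flat prefix->category dict probed with code[:2] then code[:1] (idiomatic; same cost class).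

-- ===== PORT A =====
def NTEE_CATEGORIES : List (String × List String) :=
  [("Health & Wellness", ["E", "G", "H"]),
   ("Mental Health", ["F"]),
   ("Employment/Workforce", ["J"]),
   ("Youth Services", ["O"]),
   ("Disability Services", ["P8"]),
   ("Community Services", ["P", "S"]),
   ("Housing", ["L"]),
   ("Food/Nutrition", ["K"])]

-- A's inner 'for code in codes' loop (first match returns)
def pvInnerA (c : String) : List String → Bool
  | [] => false
  | code :: rest => if PySem.Str.startswith c code then true else pvInnerA c rest

-- A's outer 'for category, codes in NTEE_CATEGORIES.items()' loop
def pvOuterA (c : String) : List (String × List String) → String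
  | [] => "Other"
  | (category, codes) :: rest =>
      if pvInnerA c codes then category else pvOuterA c rest

def get_ntee_category (ntee_code : String) : String :=
  if ntee_code = "" then "Other"
  else
    let c := PySem.Str.strip (PySem.Str.upper ntee_code)
    pvOuterA c NTEE_CATEGORIES

-- ===== PORT B =====
-- Python dict literal with distinct keys, in insertion order: Dict.mk is exact here
def CODE_TO_CATEGORY : PySem.Dict String String :=
  PySem.Dict.mk
    [("E", "Health & Wellness"), ("G", "Health & Wellness"), ("H", "Health & Wellness"),
     ("F", "Mental Health"), ("J", "Employment/Workforce"), ("O", "Youth Services"),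
     ("P8", "Disability Services"), ("P", "Community Services"), ("S", "Community Services"),
     ("L", "Housing"), ("K", "Food/Nutrition")]

-- 'for prefix in (code[:2], code[:1]): if prefix in CODE_TO_CATEGORY: return CODE_TO_CATEGORY[prefix]'
def get_ntee_category_alt (ntee_code : String) : String :=
  let code := PySem.Str.strip (PySem.Str.upper ntee_code)
  match CODE_TO_CATEGORY.get? (PySem.Str.slice code none (some 2)) with
  | some cat => cat
  | none =>
      match CODE_TO_CATEGORY.get? (PySem.Str.slice code none (some 1)) with
      | some cat => cat
      | none => "Other"

-- ===== PRECONDITION & SPEC =====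
def Spec_get_ntee_category (ntee_code : String) (out : String) : Prop := out = get_ntee_category_alt ntee_code
instance (ntee_code : String) (out : String) : Decidable (Spec_get_ntee_category ntee_code out) := by unfold Spec_get_ntee_category; infer_instance

-- ===== CLAIM (what is proved, stated in full; the proofs are below) =====
def Claim_equal_get_ntee_category : Prop := ∀ (ntee_code : String), Dom_get_ntee_category ntee_code → Spec_get_ntee_category ntee_code (get_ntee_category ntee_code)

-- ===== LEMMAS AND PROOFS =====

theorem pv_slice2 (m : List Char) : PySem.List.slice m none (some 2) = m.take 2 := by
  rw [PySem.List.slice_to m (by norm_num : (0:Int) ≤ 2)]; rfl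

theorem pv_slice1 (m : List Char) : PySem.List.slice m none (some 1) = m.take 1 := by
  rw [PySem.List.slice_to m (by norm_num : (0:Int) ≤ 1)]; rfl

theorem beq_ofList (k : String) (l : List Char) : (k == String.ofList l) = (k.toList == l) := by
  rw [Bool.eq_iff_iff]
  simp only [beq_iff_eq]
  constructor
  · rintro rfl; simp
  · intro h; rw [← String.ofList_toList (s := k), String.ofList_inj]; exact h

-- core equality on the normalized string, by cases on its first two characters
theorem pv_core (s : String) :
    pvOuterA (PySem.Str.strip (PySem.Str.upper s)) NTEE_CATEGORIES =
      get_ntee_category_alt s := by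
  unfold get_ntee_category_alt
  rw [← String.ofList_toList (s := PySem.Str.strip (PySem.Str.upper s))]
  generalize (PySem.Str.strip (PySem.Str.upper s)).toList = l
  have hE : "E".toList = ['E'] := rfl
  have hG : "G".toList = ['G'] := rfl
  have hH : "H".toList = ['H'] := rfl
  have hF : "F".toList = ['F'] := rfl
  have hJ : "J".toList = ['J'] := rfl
  have hO : "O".toList = ['O'] := rfl
  have hP8 : "P8".toList = ['P','8'] := rfl
  have hP : "P".toList = ['P'] := rfl
  have hS : "S".toList = ['S'] := rfl
  have hL : "L".toList = ['L'] := rfl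
  have hK : "K".toList = ['K'] := rfl
  match l with
  | [] => decide
  | [a] =>
      simp only [NTEE_CATEGORIES, CODE_TO_CATEGORY, pvOuterA, pvInnerA,
        PySem.Str.startswith, PySem.Chars.startswith, PySem.Str.slice,
        PySem.Chars.slice_eq_listSlice, pv_slice2, pv_slice1,
        PySem.Dict.get?_mk_cons, beq_ofList, List.take, String.toList_ofList,
        hE, hG, hH, hF, hJ, hO, hP8, hP, hS, hL, hK,
        List.isPrefixOf, Bool.and_true, List.cons_beq_cons]
      by_cases h1 : a = 'E'
      · subst h1; simp
      by_cases h2 : a = 'G'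
      · subst h2; simp
      by_cases h3 : a = 'H'
      · subst h3; simp
      by_cases h4 : a = 'F'
      · subst h4; simp
      by_cases h5 : a = 'J'
      · subst h5; simp
      by_cases h6 : a = 'O'
      · subst h6; simp
      by_cases h7 : a = 'P'
      · subst h7; simp
      by_cases h8 : a = 'S'
      · subst h8; simp
      by_cases h9 : a = 'L'
      · subst h9; simp
      by_cases h10 : a = 'K'
      · subst h10; simp
      simp [Ne.symm h1, Ne.symm h2, Ne.symm h3, Ne.symm h4, Ne.symm h5, Ne.symm h6,
        Ne.symm h7, Ne.symm h8, Ne.symm h9, Ne.symm h10, PySem.Dict.get?]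
  | a :: b :: t =>
      simp only [NTEE_CATEGORIES, CODE_TO_CATEGORY, pvOuterA, pvInnerA,
        PySem.Str.startswith, PySem.Chars.startswith, PySem.Str.slice,
        PySem.Chars.slice_eq_listSlice, pv_slice2, pv_slice1,
        PySem.Dict.get?_mk_cons, beq_ofList, List.take, String.toList_ofList,
        hE, hG, hH, hF, hJ, hO, hP8, hP, hS, hL, hK,
        List.isPrefixOf, Bool.and_true, List.cons_beq_cons]
      by_cases h1 : a = 'E'
      · subst h1; simp [PySem.Dict.get?]
      by_cases h2 : a = 'G'
      · subst h2; simp [PySem.Dict.get?]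
      by_cases h3 : a = 'H'
      · subst h3; simp [PySem.Dict.get?]
      by_cases h4 : a = 'F'
      · subst h4; simp [PySem.Dict.get?]
      by_cases h5 : a = 'J'
      · subst h5; simp [PySem.Dict.get?]
      by_cases h6 : a = 'O'
      · subst h6; simp [PySem.Dict.get?]
      by_cases h7 : a = 'P'
      · subst h7; by_cases hb : b = '8'
        · subst hb; simp
        · simp [Ne.symm hb, PySem.Dict.get?]
      by_cases h8 : a = 'S'
      · subst h8; simp [PySem.Dict.get?]
      by_cases h9 : a = 'L'
      · subst h9; simp [PySem.Dict.get?]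
      by_cases h10 : a = 'K'
      · subst h10; simp [PySem.Dict.get?]
      simp [Ne.symm h1, Ne.symm h2, Ne.symm h3, Ne.symm h4, Ne.symm h5, Ne.symm h6,
        Ne.symm h7, Ne.symm h8, Ne.symm h9, Ne.symm h10, PySem.Dict.get?]

-- ===== VERDICT (by name: the statement is the Claim_ definition above) =====
theorem get_ntee_category_spec : Claim_equal_get_ntee_category := by
  intro s _
  unfold Spec_get_ntee_category get_ntee_category
  split
  · subst s
    rw [← pv_core ""]
    have h1 : (PySem.Str.strip (PySem.Str.upper "")).toList = [] := by simp; rfl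
    have h0 : PySem.Str.strip (PySem.Str.upper "") = String.ofList [] := by
      rw [← String.ofList_toList (s := PySem.Str.strip (PySem.Str.upper "")), h1]
    rw [h0]
    decide
  · exact pv_core s
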